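-- pv_equiv track=rewrite | github.com/PVL-Linh/Lap_Trinh_Tri_Tue_Nhan_Tao_2023 | cau_3.py | xuatHien
-- ===== SOURCE A (Python) =====
-- def xuatHien ( nhap ):
--     dem = {}
--     for i in nhap:
--         if i in dem:
--             dem[i] += 1
--         else:
--             dem[i] = 1
--     SapXep = sorted(dem.keys())
--     return dem , SapXep
-- ===== SOURCE B (Python) =====
-- def xuatHien(nhap):
--     # B: sort once, then one pass grouping equal neighbours to get the sorted
--     # unique keys and their counts; the dict is rebuilt in first-appearance order.
--     s = sorted(nhap)
--     SapXep = []
--     counts = []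
--     prev = None
--     for x in s:
--         if prev == x:
--             counts[-1] += 1
--         else:
--             SapXep.append(x)
--             counts.append(1)
--         prev = x
--     cnt = dict(zip(SapXep, counts))
--     dem = {}
--     for i in nhap:
--         if i not in dem:
--             dem[i] = cnt[i]
--     return dem, SapXep
-- ===== Notes on version B (the rewrite author's own statement) =====
-- stated objective: alternative
-- what changed: B replaces A's incrementally-updated counter dict by sort-then-group: it sorts the input once, derives the sorted unique keys and their counts in one pass over adjacent equal runs, and rebuilds the dict in first-appearance order from those counts.
import Mathlib
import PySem

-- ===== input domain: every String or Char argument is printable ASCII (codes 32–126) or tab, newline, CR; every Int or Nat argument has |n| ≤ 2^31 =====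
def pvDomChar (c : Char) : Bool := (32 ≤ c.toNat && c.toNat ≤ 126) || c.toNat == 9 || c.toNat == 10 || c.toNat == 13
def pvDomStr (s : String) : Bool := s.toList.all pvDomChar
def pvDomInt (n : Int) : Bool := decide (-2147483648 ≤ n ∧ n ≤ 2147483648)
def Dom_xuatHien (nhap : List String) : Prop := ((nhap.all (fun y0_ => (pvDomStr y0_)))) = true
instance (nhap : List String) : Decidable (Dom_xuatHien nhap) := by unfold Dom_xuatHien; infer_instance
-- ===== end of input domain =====

-- B replaces A's incrementally-updated counter dict by sort-then-group-adjacent-runs: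
-- the sorted unique keys and their counts come from one pass over sorted(nhap) (objective: alternative).

-- ===== PORT A =====
def xuatHien (nhap : List String) : (List (String × Int)) × List String :=
  let dem := nhap.foldl
    (fun d i => if d.contains i then d.insert i (d.getD i 0 + 1) else d.insert i 1)
    PySem.Dict.empty
  let sapXep := PySem.List.sorted dem.keys (fun x => x) false
  (dem.items, sapXep)

-- ===== PORT B =====
-- one iteration of B's grouping loop over sorted(nhap); state = (SapXep, counts, prev).
-- 'counts[-1] += 1' is ported with getLast?/dropLast: exact, since in that branch
-- prev = some x implies counts ≠ [] (prev is only set after an element was processed).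
def xuatHienGroupStep (acc : List String × List Int × Option String) (x : String) :
    List String × List Int × Option String :=
  if acc.2.2 == some x then
    (acc.1, acc.2.1.dropLast ++ [acc.2.1.getLast?.getD 0 + 1], some x)
  else
    (acc.1 ++ [x], acc.2.1 ++ [1], some x)

def xuatHien_alt (nhap : List String) : (List (String × Int)) × List String :=
  let s := PySem.List.sorted nhap (fun x => x) false
  let g := s.foldl xuatHienGroupStep ([], [], none)
  let sapXep := g.1
  let counts := g.2.1
  let cnt : PySem.Dict String Int := PySem.Dict.ofList (sapXep.zip counts)
  -- 'cnt[i]' is ported as (cnt.get? i).getD 0: exact, since every i ∈ nhap is a key of cnt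
  let dem := nhap.foldl
    (fun d i => if d.contains i then d else d.insert i ((cnt.get? i).getD 0))
    PySem.Dict.empty
  (dem.items, sapXep)

-- ===== PRECONDITION & SPEC =====
def Spec_xuatHien (nhap : List String) (out : (List (String × Int)) × List String) : Prop := out = xuatHien_alt nhap
instance (nhap : List String) (out : (List (String × Int)) × List String) : Decidable (Spec_xuatHien nhap out) := by unfold Spec_xuatHien; infer_instance

-- ===== CLAIM (what is proved, stated in full; the proofs are below) =====
def Claim_equal_xuatHien : Prop := ∀ (nhap : List String), Dom_xuatHien nhap → Spec_xuatHien nhap (xuatHien nhap)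

-- ===== LEMMAS AND PROOFS =====


-- A's counting loop is exactly collections.Counter: in the not-yet-present branch getD gives 0.
theorem xuatHien_fold_eq_counter (nhap : List String) :
    nhap.foldl
      (fun d i => if d.contains i then d.insert i (d.getD i 0 + 1) else d.insert i 1)
      PySem.Dict.empty = PySem.Dict.counter nhap := by
  rw [← PySem.Dict.foldl_insert_getD_add_one_eq_counter]
  apply PySem.List.foldl_congr_mem
  intro d i _
  by_cases h : d.contains i = true
  · simp [h]
  · have h0 : d.getD i 0 = 0 := PySem.Dict.getD_of_not_contains d 0 (by simpa using h)
    rw [if_neg h, h0]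
    norm_num

-- appending one element to the underlying list of a set
theorem set_ofList_append_singleton (p : List String) (x : String) :
    PySem.Set.ofList (p ++ [x]) =
      (if x ∈ p then PySem.Set.ofList p else PySem.Set.ofList p ++ [x]) := by
  rw [PySem.Set.ofList_eq_foldl, List.foldl_append, ← PySem.Set.ofList_eq_foldl]
  show PySem.Set.add _ x = _
  by_cases h : x ∈ p
  · simp [PySem.Set.add, PySem.Set.contains, h, PySem.Set.mem_ofList]
  · simp [PySem.Set.add, PySem.Set.contains, h, PySem.Set.mem_ofList]

-- on a ≤-sorted list, a member is ≤ the last element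
theorem le_getLast_of_mem_of_pairwise {p : List String} {x z : String}
    (hp : p.Pairwise (· ≤ ·)) (hx : x ∈ p) (hz : p.getLast? = some z) : x ≤ z := by
  have hne : p ≠ [] := by rintro rfl; simp at hx
  have hzl : z = p.getLast hne := by
    have := List.getLast?_eq_some_getLast (l := p) hne
    rw [hz] at this; exact (Option.some_injective _ this)
  subst hzl
  have hsplit := List.dropLast_append_getLast hne
  rcases (List.mem_append.1 (hsplit ▸ hx)) with h | h
  · have hp' := hsplit ▸ hp
    exact (List.pairwise_append.1 hp').2.2 x h _ (List.mem_singleton_self _)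
  · simp at h; exact le_of_eq h

-- the last element of the dedup of a ≤-sorted list is the list's last element
theorem set_getLast_of_sorted (p : List String) (hp : p.Pairwise (· ≤ ·)) :
    (PySem.Set.ofList p).getLast? = p.getLast? := by
  induction p using List.reverseRecOn with
  | nil => rfl
  | append_singleton p x ih =>
    have hp' : p.Pairwise (· ≤ ·) := hp.sublist (List.sublist_append_left _ _)
    rw [set_ofList_append_singleton]
    by_cases h : x ∈ p
    · rw [if_pos h, ih hp']
      -- p.getLast? = some x
      obtain ⟨z, hz⟩ : ∃ z, p.getLast? = some z := by
        cases hq : p.getLast? with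
        | none => exact absurd (List.getLast?_eq_none_iff.1 hq) (by rintro rfl; simp at h)
        | some z => exact ⟨z, rfl⟩
      have hxz : x ≤ z := le_getLast_of_mem_of_pairwise hp' h hz
      have hzx : z ≤ x := by
        have hzmem : z ∈ p := List.mem_of_getLast? hz
        exact (List.pairwise_append.1 hp).2.2 z hzmem x (List.mem_singleton_self _)
      have : z = x := le_antisymm hzx hxz
      rw [hz, this]
      simp
    · rw [if_neg h]
      simp

-- the dedup of a ≤-sorted list is strictly sorted
theorem set_pairwise_lt_of_sorted (p : List String) (hp : p.Pairwise (· ≤ ·)) :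
    (PySem.Set.ofList p).Pairwise (· < ·) := by
  induction p using List.reverseRecOn with
  | nil => exact List.Pairwise.nil
  | append_singleton p x ih =>
    have hp' : p.Pairwise (· ≤ ·) := hp.sublist (List.sublist_append_left _ _)
    rw [set_ofList_append_singleton]
    by_cases h : x ∈ p
    · rw [if_pos h]; exact ih hp'
    · rw [if_neg h]
      refine List.pairwise_append.2 ⟨ih hp', List.pairwise_singleton _ _, ?_⟩
      intro y hy x' hx'
      simp only [List.mem_singleton] at hx'
      rw [hx']
      have hyp : y ∈ p := (PySem.Set.mem_ofList p y).1 hy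
      have hle : y ≤ x := (List.pairwise_append.1 hp).2.2 y hyp x (List.mem_singleton_self _)
      exact lt_of_le_of_ne hle (by rintro rfl; exact h hyp)

-- in a ≤-sorted prefix bounded by x, if the last element is not x, x does not occur
theorem not_mem_of_getLast_ne (p : List String) (x : String)
    (hp : p.Pairwise (· ≤ ·)) (hub : ∀ y ∈ p, y ≤ x) (hne : p.getLast? ≠ some x) : x ∉ p := by
  intro hx
  obtain ⟨z, hz⟩ : ∃ z, p.getLast? = some z := by
    cases hq : p.getLast? with
    | none => exact absurd (List.getLast?_eq_none_iff.1 hq) (by rintro rfl; simp at hx)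
    | some z => exact ⟨z, rfl⟩
  have hxz : x ≤ z := le_getLast_of_mem_of_pairwise hp hx hz
  have hzx : z ≤ x := hub z (List.mem_of_getLast? hz)
  exact hne (by rw [hz, le_antisymm hzx hxz])

-- invariant of B's grouping loop: after a ≤-sorted prefix p the state is
-- (distinct keys of p, their multiplicities in p, last element of p)
theorem group_inv (rest : List String) : ∀ (p : List String),
    (p ++ rest).Pairwise (· ≤ ·) →
    rest.foldl xuatHienGroupStep
      (PySem.Set.ofList p, (PySem.Set.ofList p).map (fun k => (p.count k : Int)), p.getLast?) =
    (PySem.Set.ofList (p ++ rest),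
      (PySem.Set.ofList (p ++ rest)).map (fun k => ((p ++ rest).count k : Int)),
      (p ++ rest).getLast?) := by
  induction rest with
  | nil => intro p _; simp
  | cons x rest ih =>
    intro p hp
    have hp' : p.Pairwise (· ≤ ·) := hp.sublist (List.sublist_append_left _ _)
    have hub : ∀ y ∈ p, y ≤ x := fun y hy =>
      (List.pairwise_append.1 hp).2.2 y hy x (List.mem_cons_self)
    have hstep : xuatHienGroupStep
        (PySem.Set.ofList p, (PySem.Set.ofList p).map (fun k => (p.count k : Int)), p.getLast?) x =
        (PySem.Set.ofList (p ++ [x]),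
          (PySem.Set.ofList (p ++ [x])).map (fun k => ((p ++ [x]).count k : Int)),
          (p ++ [x]).getLast?) := by
      by_cases hcond : p.getLast? = some x
      · have hxmem : x ∈ p := List.mem_of_getLast? hcond
        have hkeys : PySem.Set.ofList (p ++ [x]) = PySem.Set.ofList p := by
          rw [set_ofList_append_singleton, if_pos hxmem]
        have hkslast : (PySem.Set.ofList p).getLast? = some x := by
          rw [set_getLast_of_sorted p hp', hcond]
        have hsplit : (PySem.Set.ofList p).dropLast ++ [x] = PySem.Set.ofList p :=
          List.dropLast_append_getLast? x hkslast
        have hnd : (PySem.Set.ofList p).Nodup := PySem.Set.nodup_ofList p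
        rw [← hsplit] at hnd
        have hdisj := List.disjoint_of_nodup_append hnd
        have hcount : ∀ y ∈ (PySem.Set.ofList p).dropLast,
            ((p ++ [x]).count y : Int) = (p.count y : Int) := by
          intro y hy
          have hyx : y ≠ x := fun h => hdisj hy (by simp [h])
          simp [List.count_append, List.count_cons, hyx, Ne.symm hyx]
        have hcx : ((p ++ [x]).count x : Int) = (p.count x : Int) + 1 := by
          simp [List.count_append]
        simp only [xuatHienGroupStep, hcond, beq_self_eq_true, if_true]
        refine Prod.ext ?_ (Prod.ext ?_ ?_)
        · simpa using hkeys.symm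
        · show (((PySem.Set.ofList p).map (fun k => (p.count k : Int))).dropLast) ++
            [((PySem.Set.ofList p).map (fun k => (p.count k : Int))).getLast?.getD 0 + 1] =
            (PySem.Set.ofList (p ++ [x])).map (fun k => ((p ++ [x]).count k : Int))
          rw [hkeys]
          conv_rhs => rw [← hsplit]
          rw [List.map_append, ← List.map_dropLast, List.getLast?_map, hkslast]
          simp only [Option.map_some, Option.getD_some, List.map_cons, List.map_nil]
          congr 1
          · exact (List.map_congr_left hcount).symm
          · rw [hcx]
        · show some x = (p ++ [x]).getLast?
          simp
      · have hxmem : x ∉ p := not_mem_of_getLast_ne p x hp' hub hcond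
        have hkeys : PySem.Set.ofList (p ++ [x]) = PySem.Set.ofList p ++ [x] := by
          rw [set_ofList_append_singleton, if_neg hxmem]
        have hbeq : (p.getLast? == some x) = false := by
          simp [hcond]
        simp only [xuatHienGroupStep, hbeq, if_false]
        refine Prod.ext ?_ (Prod.ext ?_ ?_)
        · simpa using hkeys.symm
        · show (PySem.Set.ofList p).map (fun k => (p.count k : Int)) ++ [1] =
            (PySem.Set.ofList (p ++ [x])).map (fun k => ((p ++ [x]).count k : Int))
          rw [hkeys, List.map_append]
          congr 1
          · apply List.map_congr_left
            intro y hy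
            have hyx : y ≠ x := fun h => hxmem (h ▸ (PySem.Set.mem_ofList p y).1 hy)
            simp [List.count_append, Ne.symm hyx]
          · have : x ∉ p := hxmem
            simp [List.count_append, List.count_eq_zero_of_not_mem this]
        · show some x = (p ++ [x]).getLast?
          simp
    rw [List.foldl_cons, hstep]
    have hp2 : ((p ++ [x]) ++ rest).Pairwise (· ≤ ·) := by
      rw [List.append_assoc]; simpa using hp
    have := ih (p ++ [x]) hp2
    rw [this]
    simp [List.append_assoc]

-- a dict literal with distinct keys has exactly that items list
theorem dict_ofList_items (l : List (String × Int)) (h : (l.map (·.1)).Nodup) :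
    (PySem.Dict.ofList l).items = l := by
  have := PySem.Dict.items_foldl_insert_fresh l (·.1) (·.2) PySem.Dict.empty
    (by intro a _; exact PySem.Dict.contains_empty _) h
  simpa using this

-- B's dem loop collects first occurrences of nhap, valued by v
theorem dem_fold (v : String → Int) (l : List String) : ∀ (d : PySem.Dict String Int) (p : List String),
    d.items = (PySem.Set.ofList p).map (fun k => (k, v k)) →
    (l.foldl (fun d i => if d.contains i then d else d.insert i (v i)) d).items =
      (PySem.Set.ofList (p ++ l)).map (fun k => (k, v k)) := by
  induction l with
  | nil => intro d p h; simpa using h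
  | cons i l ih =>
    intro d p h
    have hkeys : d.keys = PySem.Set.ofList p := by
      show d.items.map (·.1) = _
      rw [h, List.map_map]
      simp [Function.comp_def]
    have hcont : d.contains i = decide (i ∈ p) := by
      rw [PySem.Dict.contains_eq_decide_mem_keys, hkeys]
      simp [PySem.Set.mem_ofList]
    have hofl : PySem.Set.ofList (p ++ [i]) = if i ∈ p then PySem.Set.ofList p else PySem.Set.ofList p ++ [i] := by
      rw [PySem.Set.ofList_eq_foldl, List.foldl_append, ← PySem.Set.ofList_eq_foldl]
      show PySem.Set.add _ i = _
      by_cases hm : i ∈ p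
      · simp [PySem.Set.add, PySem.Set.contains, hm, PySem.Set.mem_ofList]
      · simp [PySem.Set.add, PySem.Set.contains, hm, PySem.Set.mem_ofList]
    rw [List.foldl_cons]
    by_cases hm : i ∈ p
    · rw [if_pos (by simp [hcont, hm])]
      have : p ++ i :: l = (p ++ [i]) ++ l := by simp
      rw [this]
      exact ih d (p ++ [i]) (by rw [hofl, if_pos hm]; exact h)
    · rw [if_neg (by simp [hcont, hm])]
      have : p ++ i :: l = (p ++ [i]) ++ l := by simp
      rw [this]
      refine ih _ (p ++ [i]) ?_
      rw [PySem.Dict.items_insert_of_not_contains d (v i) (by simp [hcont, hm]), h,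
        hofl, if_neg hm, List.map_append]
      simp

-- the two ports agree on every input
theorem xuatHien_eq_alt (nhap : List String) : xuatHien nhap = xuatHien_alt nhap := by
  have hs := PySem.List.sorted_perm nhap (fun x => x) false
  have hps : (PySem.List.sorted nhap (fun x => x) false).Pairwise (· ≤ ·) := by
    simpa using PySem.List.sorted_pairwise nhap (fun x => x)
  set s := PySem.List.sorted nhap (fun x => x) false with hsdef
  have hgroup : s.foldl xuatHienGroupStep ([], [], none) =
      (PySem.Set.ofList s, (PySem.Set.ofList s).map (fun k => (s.count k : Int)), s.getLast?) := by
    simpa using group_inv s [] (by simpa using hps)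
  have hks := PySem.Set.nodup_ofList s
  have hzip : (PySem.Set.ofList s).zip ((PySem.Set.ofList s).map (fun k => (s.count k : Int))) =
      (PySem.Set.ofList s).map (fun k => (k, (s.count k : Int))) := by
    simpa using (List.zip_map' (f := id) (g := fun k => (s.count k : Int)) (l := PySem.Set.ofList s))
  have hitems : (PySem.Dict.ofList ((PySem.Set.ofList s).map (fun k => (k, (s.count k : Int))))).items =
      (PySem.Set.ofList s).map (fun k => (k, (s.count k : Int))) := by
    apply dict_ofList_items
    rw [List.map_map]
    simpa [Function.comp_def] using hks
  have hget : ∀ k ∈ PySem.Set.ofList s,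
      (PySem.Dict.ofList ((PySem.Set.ofList s).map (fun k => (k, (s.count k : Int))))).get? k =
        some ((s.count k : Int)) := by
    intro k hk
    apply PySem.Dict.get?_of_mem_items
    · rw [hitems]; exact List.mem_map.2 ⟨k, hk, rfl⟩
    · show _root_.List.Nodup _
      have : (PySem.Dict.ofList ((PySem.Set.ofList s).map (fun k => (k, (s.count k : Int))))).keys =
          PySem.Set.ofList s := by
        show ((PySem.Dict.ofList _).items).map (·.1) = _
        rw [hitems, List.map_map]
        simp [Function.comp_def]
      rw [this]; exact hks
  have hsap : PySem.List.sorted (PySem.Set.ofList nhap) (fun x => x) false = PySem.Set.ofList s := by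
    apply PySem.List.sorted_eq_of_perm_of_pairwise_lt
    · exact (List.perm_ext_iff_of_nodup (PySem.Set.nodup_ofList s) (PySem.Set.nodup_ofList nhap)).2
        (by intro y; rw [PySem.Set.mem_ofList, PySem.Set.mem_ofList, hs.mem_iff])
    · simpa using set_pairwise_lt_of_sorted s hps
  -- now the two sides
  show ( _ , _ ) = _
  simp only [xuatHien, xuatHien_alt, ← hsdef, hgroup, xuatHien_fold_eq_counter,
    PySem.Dict.items_counter, PySem.Dict.keys_counter, hzip]
  refine Prod.ext ?_ ?_
  · show _ = (nhap.foldl (fun d i => if d.contains i then d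
        else d.insert i (((PySem.Dict.ofList ((PySem.Set.ofList s).map (fun k => (k, (s.count k : Int))))).get? i).getD 0)) PySem.Dict.empty).items
    rw [dem_fold _ nhap PySem.Dict.empty [] (by rfl)]
    simp only [List.nil_append]
    apply List.map_congr_left
    intro k hk
    have hkn : k ∈ nhap := (PySem.Set.mem_ofList nhap k).1 hk
    have hkss : k ∈ PySem.Set.ofList s := (PySem.Set.mem_ofList s k).2 (hs.mem_iff.2 hkn)
    rw [hget k hkss]
    simp [hs.count_eq]
  · exact hsap

-- ===== VERDICT (by name: the statement is the Claim_ definition above) =====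
theorem xuatHien_spec : Claim_equal_xuatHien := by
  intro nhap _
  unfold Spec_xuatHien
  exact xuatHien_eq_alt nhap
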